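-- pv_equiv track=rewrite | github.com/OpenVoiceOS/ovos-padatious-pipeline-plugin | ovos_padatious/match_data.py | handle_apostrophes
-- ===== SOURCE A (Python) =====
-- def handle_apostrophes(old_sentence: str) -> str:
--     """
--     Attempts to handle utterances with apostrophes in them.
--
--     Args:
--         old_sentence (str): The original sentence to process.
--
--     Returns:
--         str: A new sentence with apostrophes handled appropriately.
--     """
--     new_sentence = ''
--     apostrophe_present = False
--
--     for word in old_sentence:
--         if word == "'":
--             apostrophe_present = True
--             new_sentence += word
--         else:
--             # If the apostrophe is present we don't want to add
--             # a whitespace after the apostrophe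
--             if apostrophe_present:
--                 # If the word after the apostrophe is longer than a character long assume that
--                 # the previous word is an "s" + apostrophe instead of "word + apostrophe
--                 if len(word) > 1:
--                     new_sentence += " " + word
--                 else:
--                     new_sentence += word
--                     apostrophe_present = False
--             else:
--                 if len(new_sentence) > 0:
--                     new_sentence += " " + word
--                 else:
--                     new_sentence = word
--
--     return new_sentence
-- ===== SOURCE B (Python) =====
-- def handle_apostrophes(old_sentence: str) -> str:
--     """
--     Attempts to handle utterances with apostrophes in them.
--
--     Join every character with spaces first, then delete the space before
--     each apostrophe and the space after it.
--     """
--     spaced = ' '.join(old_sentence)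
--     return spaced.replace(" '", "'").replace("' ", "'")
-- ===== Notes on version B (the rewrite author's own statement) =====
-- stated objective: idiomatic
-- what changed: Replaced A's stateful character loop with a boolean apostrophe flag by building the fully space-joined string once and restoring apostrophe adjacency with two ordered str.replace fixups.
import Mathlib
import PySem

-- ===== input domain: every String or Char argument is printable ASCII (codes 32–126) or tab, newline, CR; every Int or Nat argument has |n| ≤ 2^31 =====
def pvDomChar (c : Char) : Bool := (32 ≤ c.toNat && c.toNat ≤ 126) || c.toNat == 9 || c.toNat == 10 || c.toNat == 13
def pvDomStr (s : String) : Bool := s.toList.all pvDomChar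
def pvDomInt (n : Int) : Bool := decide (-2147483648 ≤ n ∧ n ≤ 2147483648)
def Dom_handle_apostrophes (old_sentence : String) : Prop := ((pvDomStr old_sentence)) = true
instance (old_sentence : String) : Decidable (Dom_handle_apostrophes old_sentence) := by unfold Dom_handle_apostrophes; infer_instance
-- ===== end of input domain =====

-- B replaces A's stateful boolean-flag character loop by space-joining all
-- characters and two ordered replace fixups (idiomatic; same return value).

-- ===== PORT A =====
-- one iteration of A's for-loop; state = (new_sentence, apostrophe_present)
def handleA_step (st : List Char × Bool) (word : Char) : List Char × Bool :=
  if word = '\'' then (st.1 ++ [word], true)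
  else
    if st.2 then
      if [word].length > 1 then (st.1 ++ [' '] ++ [word], st.2)
      else (st.1 ++ [word], false)
    else
      if st.1.length > 0 then (st.1 ++ [' '] ++ [word], st.2)
      else ([word], st.2)

def handle_apostrophes (old_sentence : String) : String :=
  String.ofList ((old_sentence.toList.foldl handleA_step ([], false)).1)

-- ===== PORT B =====
def handle_apostrophes_alt (old_sentence : String) : String :=
  let spaced := PySem.Str.join " " (old_sentence.toList.map (fun c => String.ofList [c]))
  PySem.Str.replace (PySem.Str.replace spaced " '" "'") "' " "'"

-- ===== PRECONDITION & SPEC =====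
def Spec_handle_apostrophes (old_sentence : String) (out : String) : Prop := out = handle_apostrophes_alt old_sentence
instance (old_sentence : String) (out : String) : Decidable (Spec_handle_apostrophes old_sentence out) := by unfold Spec_handle_apostrophes; infer_instance

-- ===== CLAIM (what is proved, stated in full; the proofs are below) =====
def Claim_equal_handle_apostrophes : Prop := ∀ (old_sentence : String), Dom_handle_apostrophes old_sentence → Spec_handle_apostrophes old_sentence (handle_apostrophes old_sentence)

-- ===== LEMMAS AND PROOFS =====

-- replace with a two-character pattern [c₀, c₁] and a one-character
-- replacement [r], written as a fuel-free structural recursion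
def repl2 (c₀ c₁ r : Char) : List Char → List Char
  | a :: b :: t => if a = c₀ ∧ b = c₁ then r :: repl2 c₀ c₁ r t else a :: repl2 c₀ c₁ r (b :: t)
  | l => l

-- PySem.Chars.replace.go unfolding equations
theorem go_nil (old new : List Char) (fuel : Nat) (acc : List Char) :
    PySem.Chars.replace.go old new fuel [] acc = acc.reverse := by
  cases fuel <;> simp [PySem.Chars.replace.go]

theorem go_succ (old new : List Char) (fuel : Nat) (c : Char) (t acc : List Char) :
    PySem.Chars.replace.go old new (fuel + 1) (c :: t) acc =
      if old.isPrefixOf (c :: t) then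
        PySem.Chars.replace.go old new fuel (List.drop old.length (c :: t)) (new.reverse ++ acc)
      else
        PySem.Chars.replace.go old new fuel t (c :: acc) := rfl

theorem go_eq_repl2 (c₀ c₁ r : Char) :
    ∀ (fuel : Nat) (l acc : List Char), l.length ≤ fuel →
      PySem.Chars.replace.go [c₀, c₁] [r] fuel l acc = acc.reverse ++ repl2 c₀ c₁ r l := by
  intro fuel
  induction fuel with
  | zero =>
    intro l acc h
    have : l = [] := List.eq_nil_of_length_eq_zero (Nat.le_zero.mp h)
    subst this
    simp [go_nil, repl2]
  | succ fuel ih =>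
    intro l acc h
    match l with
    | [] => simp [go_nil, repl2]
    | [c] =>
      rw [go_succ]
      have hp : ([c₀, c₁].isPrefixOf [c]) = false := by
        simp [List.isPrefixOf]
      rw [hp]
      simp only [Bool.false_eq_true, if_false]
      rw [go_nil]
      simp [repl2]
    | c :: d :: t =>
      rw [go_succ]
      by_cases hcd : c = c₀ ∧ d = c₁
      · have hp : ([c₀, c₁].isPrefixOf (c :: d :: t)) = true := by
          simp [List.isPrefixOf, hcd.1, hcd.2]
        rw [hp]
        simp only [if_true]
        have hlen : t.length ≤ fuel := by simp at h; omega
        rw [show List.drop ([c₀, c₁].length) (c :: d :: t) = t by simp]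
        rw [ih t ([r].reverse ++ acc) hlen]
        simp [repl2, hcd.1, hcd.2]
      · have hp : ([c₀, c₁].isPrefixOf (c :: d :: t)) = false := by
          simp [List.isPrefixOf]
          intro h1 h2
          exact absurd ⟨h1.symm, h2.symm⟩ hcd
        rw [hp]
        simp only [Bool.false_eq_true, if_false]
        have hlen : (d :: t).length ≤ fuel := by simp at h ⊢; omega
        rw [ih (d :: t) (c :: acc) hlen]
        simp [repl2, hcd]

theorem replace_eq_repl2 (c₀ c₁ r : Char) (l : List Char) :
    PySem.Chars.replace l [c₀, c₁] [r] = repl2 c₀ c₁ r l := by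
  rw [PySem.Chars.replace]
  simp only [List.isEmpty_cons, Bool.false_eq_true, if_false]
  rw [go_eq_repl2 c₀ c₁ r l.length l [] (le_refl _)]
  simp

-- the space-joined character list (what ' '.join(old_sentence) builds)
def joinSp (l : List Char) : List Char :=
  PySem.Chars.join [' '] (l.map (fun c => [c]))

-- output shape after the first replace, past the first character
def afterR1 : List Char → List Char
  | [] => []
  | h :: t => if h = '\'' then '\'' :: afterR1 t else ' ' :: h :: afterR1 t

-- output shape of A's loop given the current apostrophe flag
def tailA (flag : Bool) : List Char → List Char
  | [] => []
  | c :: t =>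
      if c = '\'' then '\'' :: tailA true t
      else if flag then c :: tailA false t
      else ' ' :: c :: tailA false t

theorem joinSp_cons_cons (c d : Char) (t : List Char) :
    joinSp (c :: d :: t) = c :: ' ' :: joinSp (d :: t) := by
  simp [joinSp, PySem.Chars.join_cons_cons]

theorem repl1_joinSp (t : List Char) : ∀ (d : Char),
    repl2 ' ' '\'' '\'' (joinSp (d :: t)) = d :: afterR1 t ∧
    repl2 ' ' '\'' '\'' (' ' :: joinSp (d :: t)) = afterR1 (d :: t) := by
  induction t with
  | nil =>
    intro d
    constructor
    · simp [joinSp, PySem.Chars.join_singleton, repl2, afterR1]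
    · simp only [joinSp, List.map, PySem.Chars.join_singleton]
      by_cases hd : d = '\''
      · simp [repl2, hd, afterR1]
      · simp [repl2, hd, afterR1]
  | cons e t'' ih =>
    intro d
    have h1 : repl2 ' ' '\'' '\'' (joinSp (d :: e :: t'')) = d :: afterR1 (e :: t'') := by
      rw [joinSp_cons_cons]
      rw [show repl2 ' ' '\'' '\'' (d :: ' ' :: joinSp (e :: t'')) =
            if d = ' ' ∧ ' ' = '\'' then '\'' :: repl2 ' ' '\'' '\'' (joinSp (e :: t''))
            else d :: repl2 ' ' '\'' '\'' (' ' :: joinSp (e :: t'')) from rfl]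
      have : ¬ (d = ' ' ∧ ' ' = '\'') := by intro h; exact absurd h.2 (by decide)
      rw [if_neg this, (ih e).2]
    refine ⟨h1, ?_⟩
    rw [joinSp_cons_cons]
    have hJ : joinSp (e :: t'') = e :: (joinSp (e :: t'')).tail := by
      cases t'' with
      | nil => simp [joinSp, PySem.Chars.join_singleton]
      | cons f t''' => rw [joinSp_cons_cons]; rfl
    by_cases hd : d = '\''
    · subst hd
      rw [hJ]
      rw [show repl2 ' ' '\'' '\'' (' ' :: '\'' :: ' ' :: e :: (joinSp (e :: t'')).tail) =
            '\'' :: repl2 ' ' '\'' '\'' (' ' :: e :: (joinSp (e :: t'')).tail) from by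
        simp [repl2]]
      rw [← hJ, (ih e).2]
      simp [afterR1]
    · rw [show repl2 ' ' '\'' '\'' (' ' :: d :: ' ' :: joinSp (e :: t'')) =
            if ' ' = ' ' ∧ d = '\'' then '\'' :: repl2 ' ' '\'' '\'' (' ' :: joinSp (e :: t''))
            else ' ' :: repl2 ' ' '\'' '\'' (d :: ' ' :: joinSp (e :: t'')) from rfl]
      rw [if_neg (by simp [hd])]
      rw [← joinSp_cons_cons, h1]
      simp [afterR1, hd]

theorem repl2_afterR1 (t : List Char) : ∀ (c : Char),
    repl2 '\'' ' ' '\'' (c :: afterR1 t) =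
      c :: (if c = '\'' then tailA true t else tailA false t) := by
  induction t with
  | nil => intro c; simp [afterR1, repl2, tailA]
  | cons h t' ih =>
    intro c
    by_cases hh : h = '\''
    · subst hh
      rw [show afterR1 ('\'' :: t') = '\'' :: afterR1 t' from by simp [afterR1]]
      rw [show repl2 '\'' ' ' '\'' (c :: '\'' :: afterR1 t') =
            if c = '\'' ∧ '\'' = ' ' then '\'' :: repl2 '\'' ' ' '\'' (afterR1 t')
            else c :: repl2 '\'' ' ' '\'' ('\'' :: afterR1 t') from rfl]
      rw [if_neg (by intro h; exact absurd h.2 (by decide))]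
      rw [ih '\'']
      simp [tailA]
    · rw [show afterR1 (h :: t') = ' ' :: h :: afterR1 t' from by simp [afterR1, hh]]
      by_cases hc : c = '\''
      · subst hc
        rw [show repl2 '\'' ' ' '\'' ('\'' :: ' ' :: h :: afterR1 t') =
              '\'' :: repl2 '\'' ' ' '\'' (h :: afterR1 t') from by simp [repl2]]
        rw [ih h]
        simp [tailA, hh]
      · rw [show repl2 '\'' ' ' '\'' (c :: ' ' :: h :: afterR1 t') =
              if c = '\'' ∧ ' ' = ' ' then '\'' :: repl2 '\'' ' ' '\'' (h :: afterR1 t')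
              else c :: repl2 '\'' ' ' '\'' (' ' :: h :: afterR1 t') from rfl]
        rw [if_neg (by simp [hc])]
        rw [show repl2 '\'' ' ' '\'' (' ' :: h :: afterR1 t') =
              ' ' :: repl2 '\'' ' ' '\'' (h :: afterR1 t') from by simp [repl2]]
        rw [ih h]
        simp [tailA, hc, hh]

theorem foldA_invariant (t : List Char) : ∀ (acc : List Char) (flag : Bool), acc ≠ [] →
    (t.foldl handleA_step (acc, flag)).1 = acc ++ tailA flag t := by
  induction t with
  | nil => intro acc flag _; simp [tailA]
  | cons c t' ih =>
    intro acc flag hacc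
    by_cases hc : c = '\''
    · rw [show (c :: t').foldl handleA_step (acc, flag) =
            t'.foldl handleA_step (acc ++ [c], true) from by
        simp [List.foldl_cons, handleA_step, hc]]
      rw [ih (acc ++ [c]) true (by simp)]
      simp [tailA, hc]
    · cases flag with
      | true =>
        rw [show (c :: t').foldl handleA_step (acc, true) =
              t'.foldl handleA_step (acc ++ [c], false) from by
          simp [List.foldl_cons, handleA_step, hc]]
        rw [ih (acc ++ [c]) false (by simp)]
        simp [tailA, hc]
      | false =>
        rw [show (c :: t').foldl handleA_step (acc, false) =
              t'.foldl handleA_step (acc ++ [' '] ++ [c], false) from by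
          have : acc.length > 0 := List.length_pos_of_ne_nil hacc
          simp [List.foldl_cons, handleA_step, hc, this]]
        rw [ih (acc ++ [' '] ++ [c]) false (by simp)]
        simp [tailA, hc]

-- the whole pipeline on character lists
theorem core_eq (l : List Char) :
    (l.foldl handleA_step ([], false)).1 =
      repl2 '\'' ' ' '\'' (repl2 ' ' '\'' '\'' (joinSp l)) := by
  cases l with
  | nil => simp [joinSp, PySem.Chars.join_nil, repl2]
  | cons c t =>
    rw [(repl1_joinSp t c).1, repl2_afterR1 t c]
    by_cases hc : c = '\''
    · rw [show (c :: t).foldl handleA_step ([], false) =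
            t.foldl handleA_step ([c], true) from by
        simp [List.foldl_cons, handleA_step, hc]]
      rw [foldA_invariant t [c] true (by simp)]
      simp [hc]
    · rw [show (c :: t).foldl handleA_step ([], false) =
            t.foldl handleA_step ([c], false) from by
        simp [List.foldl_cons, handleA_step, hc]]
      rw [foldA_invariant t [c] false (by simp)]
      simp [hc]

-- ===== VERDICT (by name: the statement is the Claim_ definition above) =====
theorem handle_apostrophes_spec : Claim_equal_handle_apostrophes := by
  intro s _
  unfold Spec_handle_apostrophes handle_apostrophes handle_apostrophes_alt
  simp only [PySem.Str.replace, PySem.Str.join]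
  rw [String.toList_ofList, String.toList_ofList]
  congr 1
  rw [show (" '" : String).toList = [' ', '\''] from rfl,
      show ("' " : String).toList = ['\'', ' '] from rfl,
      show ("'" : String).toList = ['\''] from rfl,
      show (" " : String).toList = [' '] from rfl]
  rw [replace_eq_repl2, replace_eq_repl2]
  rw [show (s.toList.map (fun c => String.ofList [c])).map String.toList
        = s.toList.map (fun c => [c]) from by simp]
  exact core_eq s.toList
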